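-- pv_equiv track=rewrite | github.com/dem-ola/examples | scrape.py | get_consecutive_int_rows
-- ===== SOURCE A (Python) =====
-- from collections import Counter, defaultdict
--
-- def get_rows_with_integers(list_):
-- 	''' get rows where items are integers '''
-- 	rows, ints = [],[]
-- 	for i in range(len(list_)):
-- 		try:
-- 			ints.append(int(list_[i]))
-- 			rows.append(i)
-- 		except:
-- 			continue
-- 	return rows, ints
--
-- def get_consecutive_int_rows(list_):
-- 	''' get grouped rows with integer items '''
--
-- 	groups, r_group, i_group = defaultdict(dict), [], []
-- 	g_num, last_r = 1, None
--
-- 	# add improbable last row so the last group can be captured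
-- 	improbable = 999999
-- 	list_.append(improbable)
--
-- 	# get list of rows with integers
-- 	rows, ints = get_rows_with_integers(list_)
--
-- 	# parse for consecutive rows
-- 	for r, i in zip(rows, ints):
--
-- 		if not r_group: #new group
-- 			r_group.append(r)
-- 			i_group.append(i)
-- 			last_r = r
--
-- 		else:
--
-- 			# add to group if consecutive
-- 			if r - last_r == 1 and i != improbable:
-- 				r_group.append(r)
-- 				i_group.append(i)
--
-- 			else:
-- 				# save group and reset
-- 				groups[g_num]['rows'] = r_group
-- 				groups[g_num]['ints'] = i_group
-- 				g_num += 1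
--
-- 				r_group, i_group = [], []
-- 				r_group.append(r)
-- 				i_group.append(i)
--
-- 			last_r = r
--
-- 	list_.pop() # remove the improbable
--
-- 	return groups
-- ===== SOURCE B (Python) =====
-- from collections import defaultdict
--
-- def get_consecutive_int_rows(list_):
-- 	''' get grouped rows with integer items '''
-- 	# rows i where int(list_[i]) succeeds, with the converted values
-- 	pairs = []
-- 	for i, s in enumerate(list_):
-- 		try:
-- 			pairs.append((i, int(s)))
-- 		except Exception:
-- 			pass
--
-- 	# rows r sitting at positions k of `pairs` form one consecutive run
-- 	# exactly when r - k is constant, and r - k only ever grows, so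
-- 	# bucketing by r - k yields the runs, already in order
-- 	runs = {}
-- 	for k, (r, v) in enumerate(pairs):
-- 		runs.setdefault(r - k, []).append((r, v))
--
-- 	groups = defaultdict(dict)
-- 	for g_num, run in enumerate(runs.values(), 1):
-- 		groups[g_num] = {'rows': [r for r, _ in run],
-- 		                 'ints': [v for _, v in run]}
-- 	return groups
-- ===== Notes on version B (the rewrite author's own statement) =====
-- stated objective: alternative
-- what changed: B replaces A's stateful run-tracking loop (sentinel append/pop, last_r, flush-on-break) by the index-minus-rank grouping idiom: it buckets the (row,int) pairs by the invariant key row-rank in one dict, each bucket being exactly one consecutive run.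
-- intended difference: On lists where some element parses to the int 999999 and the element just before it also parses as an int, A splits the consecutive run before that row (its private sentinel value leaks into the data comparison), while B keeps the run intact, which is the intended grouping of consecutive integer rows. — e.g. on get_consecutive_int_rows(["1", "999999"]): A returns [(1, [("rows", [0]), ("ints", [1])]), (2, [("rows", [1]), ("ints", [999999])])], B returns [(1, [("rows", [0, 1]), ("ints", [1, 999999])])]
import Mathlib
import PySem

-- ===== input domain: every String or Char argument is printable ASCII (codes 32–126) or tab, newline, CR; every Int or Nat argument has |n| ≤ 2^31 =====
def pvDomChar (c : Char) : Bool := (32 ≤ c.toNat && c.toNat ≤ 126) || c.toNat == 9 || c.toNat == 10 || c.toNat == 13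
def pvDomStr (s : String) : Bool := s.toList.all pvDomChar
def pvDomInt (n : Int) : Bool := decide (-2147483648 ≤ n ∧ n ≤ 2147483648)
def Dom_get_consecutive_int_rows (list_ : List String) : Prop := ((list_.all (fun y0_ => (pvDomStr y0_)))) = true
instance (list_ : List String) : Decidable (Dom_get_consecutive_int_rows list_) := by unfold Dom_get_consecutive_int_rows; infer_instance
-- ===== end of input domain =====

-- B buckets the (row, int) pairs by the invariant key row-minus-rank instead of A's stateful
-- run-tracking loop with a 999999 sentinel appended to (and popped from) list_ (A restores
-- list_ before returning, so there is no net mutation). Objective: alternative.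

-- ===== PORT A =====
-- loop body of get_rows_with_integers, applied to (i, int-conversion of list_[i])
def grwiStep (st : List Int × List Int) (p : Int × Option Int) : List Int × List Int :=
  match p.2 with
  | some v => (st.1 ++ [p.1], st.2 ++ [v])
  | none => st

def get_rows_with_integers (vals : List (Option Int)) : List Int × List Int :=
  (PySem.List.pyRange 0 (PySem.List.len vals) 1).foldl
    (fun st i => grwiStep st (i, PySem.List.pyGetD vals i none)) ([], [])

-- one iteration of A's grouping loop; state = (groups, g_num, r_group, i_group, last_r).
-- last_r is read with getD 0 only in the elif branch, where r_group ≠ [] guarantees last_r = some _.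
def stepA (st : PySem.Dict Int (List (String × List Int)) × Int × List Int × List Int × Option Int)
    (rv : Int × Int) :
    PySem.Dict Int (List (String × List Int)) × Int × List Int × List Int × Option Int :=
  if st.2.2.1 = [] then
    (st.1, st.2.1, st.2.2.1 ++ [rv.1], st.2.2.2.1 ++ [rv.2], some rv.1)
  else if rv.1 - st.2.2.2.2.getD 0 = 1 ∧ rv.2 ≠ 999999 then
    (st.1, st.2.1, st.2.2.1 ++ [rv.1], st.2.2.2.1 ++ [rv.2], some rv.1)
  else
    -- groups[g_num]['rows'] = r_group; groups[g_num]['ints'] = i_group (fresh defaultdict entry)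
    (st.1.insert st.2.1 [("rows", st.2.2.1), ("ints", st.2.2.2.1)], st.2.1 + 1, [rv.1], [rv.2], some rv.1)

def get_consecutive_int_rows (list_ : List String) : List (Int × List (String × List Int)) :=
  -- list_.append(999999) appends the INT 999999, and int(999999) is exactly 999999: the helper
  -- sees the int() results of list_ followed by some 999999; list_.pop() then restores list_.
  let vals : List (Option Int) := list_.map PySem.Int.ofStr? ++ [some 999999]
  let ri := get_rows_with_integers vals
  let fin := (ri.1.zip ri.2).foldl stepA (PySem.Dict.empty, 1, [], [], none)
  fin.1.items

-- ===== PORT B =====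
-- pairs.append((i, int(s))) when int() succeeds, else skip
def pairStep (acc : List (Int × Int)) (p : Int × String) : List (Int × Int) :=
  match PySem.Int.ofStr? p.2 with
  | some v => acc ++ [(p.1, v)]
  | none => acc

def get_consecutive_int_rows_alt (list_ : List String) : List (Int × List (String × List Int)) :=
  let pairs := (PySem.List.enumerate list_).foldl pairStep []
  -- runs.setdefault(r - k, []).append((r, v))  ==  runs[r-k] = runs.get(r-k, []) + [(r,v)]
  let runs := (PySem.List.enumerate pairs).foldl
    (fun d kp => d.modify (kp.2.1 - kp.1) [] (fun l => l ++ [kp.2]))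
    (PySem.Dict.empty : PySem.Dict Int (List (Int × Int)))
  let groups := (PySem.List.enumerate runs.values 1).foldl
    (fun d gr => d.insert gr.1 [("rows", gr.2.map (·.1)), ("ints", gr.2.map (·.2))])
    (PySem.Dict.empty : PySem.Dict Int (List (String × List Int)))
  groups.items

-- ===== PRECONDITION & SPEC =====
-- On lists where some element parses to the int 999999 and the element just before it also
-- parses as an int, A splits the consecutive run before that row (its private sentinel value
-- leaks into the data comparison), while B keeps the run intact, which is the intended grouping.
def D_get_consecutive_int_rows (list_ : List String) : Prop :=
  ((list_.zip list_.tail).any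
    (fun p => (PySem.Int.ofStr? p.1).isSome && (PySem.Int.ofStr? p.2 == some 999999))) = true
instance (list_ : List String) : Decidable (D_get_consecutive_int_rows list_) := by
  unfold D_get_consecutive_int_rows; infer_instance

def Spec_get_consecutive_int_rows (list_ : List String) (out : List (Int × List (String × List Int))) : Prop :=
  ¬ D_get_consecutive_int_rows list_ → out = get_consecutive_int_rows_alt list_
instance (list_ : List String) (out : List (Int × List (String × List Int))) : Decidable (Spec_get_consecutive_int_rows list_ out) := by
  unfold Spec_get_consecutive_int_rows; infer_instance

def pvDiffWitness_get_consecutive_int_rows : List String := ["1", "999999"]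
def pvDiffWitnessOut_get_consecutive_int_rows :
    (List (Int × List (String × List Int))) × (List (Int × List (String × List Int))) :=
  ([(1, [("rows", [0]), ("ints", [1])]), (2, [("rows", [1]), ("ints", [999999])])],
   [(1, [("rows", [0, 1]), ("ints", [1, 999999])])])

-- ===== CLAIM =====
def Claim_unchanged_get_consecutive_int_rows : Prop := ∀ (list_ : List String), Dom_get_consecutive_int_rows list_ → Spec_get_consecutive_int_rows list_ (get_consecutive_int_rows list_)
def Claim_exact_get_consecutive_int_rows : Prop := ∀ (list_ : List String), Dom_get_consecutive_int_rows list_ → D_get_consecutive_int_rows list_ → get_consecutive_int_rows list_ ≠ get_consecutive_int_rows_alt list_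
def Claim_changed_get_consecutive_int_rows : Prop := Dom_get_consecutive_int_rows (pvDiffWitness_get_consecutive_int_rows) ∧ D_get_consecutive_int_rows (pvDiffWitness_get_consecutive_int_rows) ∧ get_consecutive_int_rows (pvDiffWitness_get_consecutive_int_rows) = pvDiffWitnessOut_get_consecutive_int_rows.1 ∧ get_consecutive_int_rows_alt (pvDiffWitness_get_consecutive_int_rows) = pvDiffWitnessOut_get_consecutive_int_rows.2 ∧ pvDiffWitnessOut_get_consecutive_int_rows.1 ≠ pvDiffWitnessOut_get_consecutive_int_rows.2

-- ===== LEMMAS AND PROOFS =====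

-- the canonical splitting of the pair list into maximal consecutive-row runs (left fold)
def splitStep (st : List (List (Int × Int)) × List (Int × Int)) (p : Int × Int) :
    List (List (Int × Int)) × List (Int × Int) :=
  match st.2.getLast? with
  | none => (st.1, [p])
  | some q => if p.1 - q.1 = 1 then (st.1, st.2 ++ [p]) else (st.1 ++ [st.2], [p])

-- runs produced from a current (nonempty) run `cur` followed by the remaining pairs
def runsFrom (cur : List (Int × Int)) (ps : List (Int × Int)) : List (List (Int × Int)) :=
  ((ps.foldl splitStep ([], cur)).1) ++ [(ps.foldl splitStep ([], cur)).2]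

def runsOf (ps : List (Int × Int)) : List (List (Int × Int)) :=
  match ps with
  | [] => []
  | p :: rest => runsFrom [p] rest

def runEntry (run : List (Int × Int)) : List (String × List Int) :=
  [("rows", run.map (·.1)), ("ints", run.map (·.2))]

-- committing a list of runs into the groups dict with numbers g, g+1, …
def commit (d : PySem.Dict Int (List (String × List Int))) (g : Int)
    (rs : List (List (Int × Int))) : PySem.Dict Int (List (String × List Int)) :=
  (PySem.List.enumerate rs g).foldl (fun d gr => d.insert gr.1 (runEntry gr.2)) d

theorem grwi_eq (vals : List (Option Int)) :
    get_rows_with_integers vals = (PySem.List.enumerate vals).foldl grwiStep ([], []) := by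
  unfold get_rows_with_integers
  rw [PySem.List.enumerate_eq_map_pyRange vals none, List.foldl_map]

theorem grwiZip (l : List (Int × Option Int)) (ra ia : List Int) (h : ra.length = ia.length) :
    ((l.foldl grwiStep (ra, ia)).1).zip (l.foldl grwiStep (ra, ia)).2
      = ra.zip ia ++ l.filterMap (fun p => p.2.map (fun v => (p.1, v))) := by
  induction l generalizing ra ia with
  | nil => simp
  | cons p l ih =>
    obtain ⟨i, ov⟩ := p
    cases ov with
    | none => simpa [grwiStep] using ih ra ia h
    | some v =>
      have := ih (ra ++ [i]) (ia ++ [v]) (by simp [h])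
      simp only [List.foldl_cons, grwiStep] at this ⊢
      rw [this, List.zip_append h]
      simp

theorem enumerate_map_eq {α β : Type} (f : α → β) (xs : List α) (s : Int) :
    PySem.List.enumerate (xs.map f) s = (PySem.List.enumerate xs s).map (fun p => (p.1, f p.2)) := by
  induction xs generalizing s with
  | nil => simp [PySem.List.enumerate]
  | cons x xs ih => simp [PySem.List.enumerate_cons, ih]

theorem pairFold (l : List (Int × String)) (acc : List (Int × Int)) :
    l.foldl pairStep acc = acc ++ l.filterMap (fun p => (PySem.Int.ofStr? p.2).map (fun v => (p.1, v))) := by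
  induction l generalizing acc with
  | nil => simp
  | cons p l ih =>
    cases hp : PySem.Int.ofStr? p.2 <;> simp [pairStep, hp, ih]

-- A's pair stream is B's pair stream followed by the sentinel pair
theorem pairs_decomp (list_ : List String) :
    ((get_rows_with_integers (list_.map PySem.Int.ofStr? ++ [some 999999])).1).zip
      (get_rows_with_integers (list_.map PySem.Int.ofStr? ++ [some 999999])).2
    = (PySem.List.enumerate list_).foldl pairStep [] ++ [((list_.length : Int), 999999)] := by
  rw [grwi_eq, grwiZip _ [] [] rfl, pairFold]
  rw [PySem.List.enumerate_append, List.filterMap_append, enumerate_map_eq]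
  simp [PySem.List.enumerate, List.filterMap_map]

-- membership in the pair list: row index and parsed value
theorem mem_pairs (list_ : List String) (p : Int × Int)
    (hp : p ∈ (PySem.List.enumerate list_).foldl pairStep []) :
    ∃ (k : Nat) (hk : k < list_.length), p.1 = (k : Int) ∧ PySem.Int.ofStr? list_[k] = some p.2 := by
  rw [pairFold] at hp
  simp only [List.nil_append, List.mem_filterMap, Option.map_eq_some_iff] at hp
  obtain ⟨q, hq, v, hv, rfl⟩ := hp
  rw [PySem.List.mem_enumerate_iff] at hq
  obtain ⟨k, hk, rfl⟩ := hq
  exact ⟨k, hk, by simpa using rfl, by simpa using hv⟩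

-- the goodness relation: a consecutive extension never carries the sentinel value
def RG (p q : Int × Int) : Prop := q.1 = p.1 + 1 → q.2 ≠ 999999

-- acc is only ever appended to
theorem splitStep_acc (ps : List (Int × Int)) (acc acc' : List (List (Int × Int)))
    (cur : List (Int × Int)) :
    ps.foldl splitStep (acc ++ acc', cur)
      = (acc ++ (ps.foldl splitStep (acc', cur)).1, (ps.foldl splitStep (acc', cur)).2) := by
  induction ps generalizing acc' cur with
  | nil => simp
  | cons p ps ih =>
    simp only [List.foldl_cons, splitStep]
    cases h : cur.getLast? with
    | none => exact ih acc' [p]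
    | some q =>
      by_cases hc : p.1 - q.1 = 1
      · simp only [hc, if_pos rfl]
        exact ih acc' (cur ++ [p])
      · simp only [if_neg hc]
        rw [show acc ++ acc' ++ [cur] = acc ++ (acc' ++ [cur]) by simp]
        exact ih (acc' ++ [cur]) [p]

-- A's split condition in full: extend only when consecutive AND the value is not the sentinel
def splitStepF (st : List (List (Int × Int)) × List (Int × Int)) (p : Int × Int) :
    List (List (Int × Int)) × List (Int × Int) :=
  match st.2.getLast? with
  | none => (st.1, [p])
  | some q => if p.1 - q.1 = 1 ∧ p.2 ≠ 999999 then (st.1, st.2 ++ [p])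
              else (st.1 ++ [st.2], [p])

def runsFromF (cur : List (Int × Int)) (ps : List (Int × Int)) : List (List (Int × Int)) :=
  ((ps.foldl splitStepF ([], cur)).1) ++ [(ps.foldl splitStepF ([], cur)).2]

def runsOfF (ps : List (Int × Int)) : List (List (Int × Int)) :=
  match ps with
  | [] => []
  | p :: rest => runsFromF [p] rest

theorem splitStepF_acc (ps : List (Int × Int)) (acc acc' : List (List (Int × Int)))
    (cur : List (Int × Int)) :
    ps.foldl splitStepF (acc ++ acc', cur)
      = (acc ++ (ps.foldl splitStepF (acc', cur)).1, (ps.foldl splitStepF (acc', cur)).2) := by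
  induction ps generalizing acc' cur with
  | nil => simp
  | cons p ps ih =>
    simp only [List.foldl_cons, splitStepF]
    cases h : cur.getLast? with
    | none => exact ih acc' [p]
    | some q =>
      by_cases hc : p.1 - q.1 = 1 ∧ p.2 ≠ 999999
      · simp only [if_pos hc]
        exact ih acc' (cur ++ [p])
      · simp only [if_neg hc]
        rw [show acc ++ acc' ++ [cur] = acc ++ (acc' ++ [cur]) by simp]
        exact ih (acc' ++ [cur]) [p]

theorem runsFromF_break (cur : List (Int × Int)) (q p : Int × Int) (ps : List (Int × Int))
    (hlast : cur.getLast? = some q) (hc : ¬ (p.1 - q.1 = 1 ∧ p.2 ≠ 999999)) :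
    runsFromF cur (p :: ps) = cur :: runsFromF [p] ps := by
  simp only [runsFromF, List.foldl_cons, splitStepF, hlast, if_neg hc, List.nil_append]
  rw [show [cur] = [cur] ++ ([] : List (List (Int × Int))) by simp, splitStepF_acc]
  simp

-- A's grouping loop, started on a nonempty current run, commits exactly the F-split runs
theorem loopA (ps : List (Int × Int)) (n : Int)
    (d : PySem.Dict Int (List (String × List Int))) (g : Int)
    (cur : List (Int × Int)) (q : Int × Int) (hlast : cur.getLast? = some q) :
    ((ps ++ [(n, 999999)]).foldl stepA
        (d, g, cur.map Prod.fst, cur.map Prod.snd, some q.1)).1.items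
      = (commit d g (runsFromF cur ps)).items := by
  induction ps generalizing d g cur q with
  | nil =>
    have hne : cur.map Prod.fst ≠ [] := by
      intro h; rw [List.map_eq_nil_iff] at h; simp [h] at hlast
    simp only [List.nil_append, List.foldl_cons, List.foldl_nil, stepA, if_neg hne]
    rw [if_neg (by simp)]
    simp [runsFromF, commit, runEntry, PySem.List.enumerate]
  | cons p ps ih =>
    have hne : cur ≠ [] := by intro h; simp [h] at hlast
    have hne' : cur.map Prod.fst ≠ [] := by simpa using hne
    by_cases hc : p.1 - q.1 = 1 ∧ p.2 ≠ 999999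
    · have hA : stepA (d, g, cur.map Prod.fst, cur.map Prod.snd, some q.1) p
          = (d, g, cur.map Prod.fst ++ [p.1], cur.map Prod.snd ++ [p.2], some p.1) := by
        simp [stepA, hne', hc.1, hc.2]
      have hrf : runsFromF cur (p :: ps) = runsFromF (cur ++ [p]) ps := by
        simp [runsFromF, splitStepF, hlast, hc]
      simp only [List.cons_append, List.foldl_cons, hA, hrf]
      have := ih d g (cur ++ [p]) p (by simp)
      simpa using this
    · have hA : stepA (d, g, cur.map Prod.fst, cur.map Prod.snd, some q.1) p
          = (d.insert g (runEntry cur), g + 1, [p.1], [p.2], some p.1) := by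
        simp only [stepA, if_neg hne']
        rw [if_neg (by simpa using hc)]
        simp [runEntry]
      have hrf : runsFromF cur (p :: ps) = cur :: runsFromF [p] ps :=
        runsFromF_break cur q p ps hlast hc
      have hcm : commit d g (cur :: runsFromF [p] ps)
          = commit (d.insert g (runEntry cur)) (g + 1) (runsFromF [p] ps) := by
        simp [commit, PySem.List.enumerate_cons]
      simp only [List.cons_append, List.foldl_cons, hA, hrf, hcm]
      exact ih _ (g + 1) [p] p (by simp)

theorem runsFrom_break (cur : List (Int × Int)) (q p : Int × Int) (ps : List (Int × Int))
    (hlast : cur.getLast? = some q) (hc : ¬ p.1 - q.1 = 1) :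
    runsFrom cur (p :: ps) = cur :: runsFrom [p] ps := by
  simp only [runsFrom, List.foldl_cons, splitStep, hlast, if_neg hc, List.nil_append]
  rw [show [cur] = [cur] ++ ([] : List (List (Int × Int))) by simp, splitStep_acc]
  simp

-- outside D_ the sentinel conjunct never fires, so the two splitters agree
theorem runsFromF_eq_runsFrom (ps : List (Int × Int)) (cur : List (Int × Int)) (q : Int × Int)
    (hlast : cur.getLast? = some q) (hG : List.IsChain RG (cur ++ ps)) :
    runsFromF cur ps = runsFrom cur ps := by
  induction ps generalizing cur q with
  | nil => simp [runsFromF, runsFrom]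
  | cons p ps ih =>
    have hne : cur ≠ [] := by intro h; simp [h] at hlast
    by_cases hc : p.1 - q.1 = 1
    · have hRG : RG q p := by
        have := List.isChain_append.mp hG
        exact this.2.2 q (by simpa using hlast) p rfl
      have hp999 : p.2 ≠ 999999 := hRG (by omega)
      have h1 : runsFromF cur (p :: ps) = runsFromF (cur ++ [p]) ps := by
        simp [runsFromF, splitStepF, hlast, hc, hp999]
      have h2 : runsFrom cur (p :: ps) = runsFrom (cur ++ [p]) ps := by
        simp [runsFrom, splitStep, hlast, hc]
      rw [h1, h2]
      exact ih (cur ++ [p]) p (by simp) (by simpa using hG)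
    · have h1 : runsFromF cur (p :: ps) = cur :: runsFromF [p] ps :=
        runsFromF_break cur q p ps hlast (by tauto)
      have h2 : runsFrom cur (p :: ps) = cur :: runsFrom [p] ps :=
        runsFrom_break cur q p ps hlast hc
      rw [h1, h2]
      have hGrest : List.IsChain RG ([p] ++ ps) := by
        have := List.isChain_append.mp hG
        exact this.2.1
      rw [ih [p] p (by simp) (by simpa using hGrest)]

-- the first maximal consecutive run after a row r, and the remaining pairs
def splitRun1 (r : Int) : List (Int × Int) → List (Int × Int) × List (Int × Int)
  | [] => ([], [])
  | p :: ps =>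
      if p.1 = r + 1 then (p :: (splitRun1 p.1 ps).1, (splitRun1 p.1 ps).2)
      else ([], p :: ps)

theorem splitRun1_cons (r : Int) (p : Int × Int) (ps : List (Int × Int)) :
    splitRun1 r (p :: ps)
      = if p.1 = r + 1 then (p :: (splitRun1 p.1 ps).1, (splitRun1 p.1 ps).2)
        else ([], p :: ps) := rfl

theorem splitRun1_append (r : Int) (ps : List (Int × Int)) :
    (splitRun1 r ps).1 ++ (splitRun1 r ps).2 = ps := by
  induction ps generalizing r with
  | nil => simp [splitRun1]
  | cons p ps ih =>
    by_cases h : p.1 = r + 1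
    · simp [splitRun1_cons, h, ih]
    · simp [splitRun1_cons, h]

theorem splitRun1_fst (r : Int) (ps : List (Int × Int)) (i : Nat)
    (hi : i < (splitRun1 r ps).1.length) : ((splitRun1 r ps).1)[i].1 = r + 1 + i := by
  induction ps generalizing r i with
  | nil => simp [splitRun1] at hi
  | cons p ps ih =>
    simp only [splitRun1_cons] at hi ⊢
    by_cases h : p.1 = r + 1
    · simp only [if_pos h] at hi ⊢
      cases i with
      | zero => simpa using h
      | succ i =>
        have := ih p.1 i (by simpa using hi)
        rw [List.getElem_cons_succ, this, h]
        push_cast; ring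
    · simp only [if_neg h] at hi; simp at hi

theorem fst_ge_of_pairwise (l : List (Int × Int))
    (hp : l.Pairwise (fun x y => x.1 < y.1)) (m : Nat) (hm : m < l.length) (h0 : 0 < l.length) :
    (l[0]'h0).1 + (m : Int) ≤ l[m].1 := by
  induction m with
  | zero => norm_num
  | succ m ih =>
    have h1 := ih (by omega)
    have h2 : l[m].1 < l[m + 1].1 :=
      List.pairwise_iff_getElem.mp hp m (m + 1) (by omega) hm (by omega)
    push_cast at h1 ⊢
    omega

-- every pair of the remainder, at its offset, lies strictly above the first run
theorem splitRun1_b_fst (r : Int) (ps : List (Int × Int))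
    (hpw : ps.Pairwise (fun x y => x.1 < y.1)) (hgt : ∀ x ∈ ps, r < x.1)
    (i : Nat) (hi : i < (splitRun1 r ps).2.length) :
    r + 2 + (splitRun1 r ps).1.length + (i : Int) ≤ ((splitRun1 r ps).2)[i].1 := by
  induction ps generalizing r with
  | nil => simp [splitRun1] at hi
  | cons p ps ih =>
    simp only [splitRun1_cons] at hi ⊢
    by_cases h : p.1 = r + 1
    · simp only [if_pos h] at hi ⊢
      have hpw' := List.Pairwise.of_cons hpw
      have hgt' : ∀ x ∈ ps, p.1 < x.1 := fun x hx => (List.pairwise_cons.mp hpw).1 x hx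
      have := ih p.1 hpw' hgt' hi
      simp only [List.length_cons] at *
      push_cast at this ⊢
      omega
    · simp only [if_neg h] at hi ⊢
      have h0 : ((p :: ps)[0]'(by simp)).1 = p.1 := rfl
      have := fst_ge_of_pairwise (p :: ps) hpw i (by simpa using hi) (by simp)
      rw [h0] at this
      have hpr : r < p.1 := hgt p List.mem_cons_self
      simp only [List.length_nil]
      push_cast
      omega

theorem runsFrom_splitRun1 (ps : List (Int × Int)) (cur : List (Int × Int)) (q : Int × Int)
    (hlast : cur.getLast? = some q) :
    runsFrom cur ps = (cur ++ (splitRun1 q.1 ps).1) :: runsOf (splitRun1 q.1 ps).2 := by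
  induction ps generalizing cur q with
  | nil => simp [runsFrom, splitRun1, runsOf]
  | cons p ps ih =>
    simp only [splitRun1_cons]
    by_cases hc : p.1 - q.1 = 1
    · have hstep : runsFrom cur (p :: ps) = runsFrom (cur ++ [p]) ps := by
        simp [runsFrom, splitStep, hlast, hc]
      rw [hstep, ih (cur ++ [p]) p (by simp)]
      simp only [if_pos (by omega : p.1 = q.1 + 1)]
      simp
    · rw [runsFrom_break cur q p ps hlast hc]
      simp only [if_neg (by omega : ¬ p.1 = q.1 + 1)]
      simp [runsOf]

-- rank-keyed pair list: position k of `ps` (counting from j) is tagged with key fst - k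
def keyed (j : Int) (ps : List (Int × Int)) : List (Int × (Int × Int)) :=
  (PySem.List.enumerate ps j).map (fun kp => (kp.2.1 - kp.1, kp.2))

theorem keyed_length (j : Int) (ps : List (Int × Int)) : (keyed j ps).length = ps.length := by
  simp [keyed, PySem.List.length_enumerate]

theorem keyed_getElem (j : Int) (ps : List (Int × Int)) (i : Nat) (hi : i < ps.length) :
    (keyed j ps)[i]'(by simpa [keyed_length] using hi) = (ps[i].1 - (j + i), ps[i]) := by
  simp [keyed, PySem.List.getElem_enumerate]

theorem keyed_map_snd (j : Int) (ps : List (Int × Int)) :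
    (keyed j ps).map Prod.snd = ps := by
  simp only [keyed, List.map_map]
  exact PySem.List.map_snd_enumerate ps j

theorem keyed_cons (j : Int) (p : Int × Int) (ps : List (Int × Int)) :
    keyed j (p :: ps) = (p.1 - j, p) :: keyed (j + 1) ps := by
  simp [keyed, PySem.List.enumerate_cons]

theorem keyed_append (j : Int) (a b : List (Int × Int)) :
    keyed j (a ++ b) = keyed j a ++ keyed (j + a.length) b := by
  simp [keyed, PySem.List.enumerate_append]

-- Set.add over a list, started after a fresh head element, keeps the head in front
theorem foldl_add_fresh (l : List Int) (s : List Int) (x : Int) (hx : x ∉ l) :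
    l.foldl PySem.Set.add (x :: s) = x :: l.foldl PySem.Set.add s := by
  induction l generalizing s with
  | nil => simp
  | cons y l ih =>
    have hyx : ¬ (y = x) := fun h => hx (h ▸ List.mem_cons_self)
    have hstep : PySem.Set.add (x :: s) y = x :: PySem.Set.add s y := by
      simp only [PySem.Set.add, PySem.Set.contains, List.contains_cons]
      have : (y == x) = false := by simpa using hyx
      rw [this]
      simp only [Bool.false_or]
      split_ifs <;> simp
    rw [List.foldl_cons, hstep, List.foldl_cons]
    exact ih _ (fun h => hx (List.mem_cons_of_mem _ h))

theorem foldl_add_mem (l : List Int) (s : List Int) (h : ∀ y ∈ l, y ∈ s) :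
    l.foldl PySem.Set.add s = s := by
  induction l with
  | nil => rfl
  | cons y l ih =>
    have hy : y ∈ s := h y List.mem_cons_self
    have : PySem.Set.add s y = s := by
      simp [PySem.Set.add, PySem.Set.contains, hy]
    rw [List.foldl_cons, this]
    exact ih (fun z hz => h z (List.mem_cons_of_mem _ hz))

theorem dedup_head_block (k0 : Int) (ak bk : List Int)
    (h1 : ∀ x ∈ ak, x = k0) (h2 : k0 ∉ bk) :
    PySem.List.dedup (k0 :: ak ++ bk) = k0 :: PySem.List.dedup bk := by
  have hof : ∀ l : List Int, PySem.List.dedup l = l.foldl PySem.Set.add [] := by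
    intro l; rw [PySem.List.dedup_eq_ofList, PySem.Set.ofList_eq_foldl]
  rw [hof, hof]
  have : (k0 :: ak ++ bk).foldl PySem.Set.add [] = (ak ++ bk).foldl PySem.Set.add [k0] := by
    simp [PySem.Set.add, PySem.Set.contains]
  rw [this, List.foldl_append, foldl_add_mem ak [k0] (by intro y hy; simp [h1 y hy])]
  exact foldl_add_fresh bk [] k0 h2

-- the heart of the B-side proof: grouping a strictly-increasing pair list by row-minus-rank
-- produces exactly the maximal consecutive runs, in order
theorem groupByKey_eq_runs (n : Nat) : ∀ (ps : List (Int × Int)), ps.length ≤ n →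
    ∀ (j : Int), ps.Pairwise (fun x y => x.1 < y.1) →
    (PySem.List.dedup ((keyed j ps).map Prod.fst)).map
        (fun k => ((keyed j ps).filter (fun x => x.1 == k)).map Prod.snd)
      = runsOf ps := by
  induction n with
  | zero =>
    intro ps hlen j _
    have : ps = [] := List.length_eq_zero_iff.mp (by omega)
    subst this; simp [keyed, PySem.List.enumerate, runsOf, PySem.List.dedup]
  | succ n ih =>
    intro ps hlen j hpw
    match ps with
    | [] => simp [keyed, PySem.List.enumerate, runsOf, PySem.List.dedup]
    | p :: rest =>
      have hpwt : rest.Pairwise (fun x y : Int × Int => x.1 < y.1) := List.Pairwise.of_cons hpw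
      have hgt : ∀ x ∈ rest, p.1 < x.1 := fun x hx => (List.pairwise_cons.mp hpw).1 x hx
      have hrest : rest = (splitRun1 p.1 rest).1 ++ (splitRun1 p.1 rest).2 :=
        (splitRun1_append p.1 rest).symm
      -- all keys in the first-run part equal the head key p.1 - j
      have hA2 : ∀ x ∈ keyed (j + 1) (splitRun1 p.1 rest).1, x.1 = p.1 - j := by
        intro x hx
        obtain ⟨i, hi, rfl⟩ := List.mem_iff_getElem.mp hx
        have hi' : i < (splitRun1 p.1 rest).1.length := by simpa [keyed_length] using hi
        rw [keyed_getElem (j + 1) _ i hi', splitRun1_fst p.1 rest i hi']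
        omega
      -- all keys in the remainder part exceed it
      have hA3 : ∀ x ∈ keyed (j + 1 + (splitRun1 p.1 rest).1.length) (splitRun1 p.1 rest).2,
          p.1 - j < x.1 := by
        intro x hx
        obtain ⟨i, hi, rfl⟩ := List.mem_iff_getElem.mp hx
        have hi' : i < (splitRun1 p.1 rest).2.length := by simpa [keyed_length] using hi
        rw [keyed_getElem _ _ i hi']
        have := splitRun1_b_fst p.1 rest hpwt hgt i hi'
        omega
      -- decompose the keyed list
      have hdec : keyed j (p :: rest) =
          (p.1 - j, p) :: (keyed (j + 1) (splitRun1 p.1 rest).1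
            ++ keyed (j + 1 + (splitRun1 p.1 rest).1.length) (splitRun1 p.1 rest).2) := by
        conv_lhs => rw [show p :: rest = p :: ((splitRun1 p.1 rest).1 ++ (splitRun1 p.1 rest).2)
          from by rw [← hrest]]
        rw [keyed_cons, keyed_append]
      have hk0nb : p.1 - j ∉ (keyed (j + 1 + (splitRun1 p.1 rest).1.length)
          (splitRun1 p.1 rest).2).map Prod.fst := by
        intro hmem
        obtain ⟨x, hx, hxk⟩ := List.mem_map.mp hmem
        have := hA3 x hx; omega
      have hded : PySem.List.dedup ((keyed j (p :: rest)).map Prod.fst)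
          = (p.1 - j) :: PySem.List.dedup ((keyed (j + 1 + (splitRun1 p.1 rest).1.length)
              (splitRun1 p.1 rest).2).map Prod.fst) := by
        rw [hdec, List.map_cons, List.map_append]
        exact dedup_head_block _ _ _
          (by intro x hx; obtain ⟨y, hy, rfl⟩ := List.mem_map.mp hx; exact hA2 y hy) hk0nb
      -- filter at the head key collects exactly the first run
      have hfilt0 : ((keyed j (p :: rest)).filter (fun x => x.1 == p.1 - j)).map Prod.snd
          = p :: (splitRun1 p.1 rest).1 := by
        rw [hdec, List.filter_cons_of_pos (by simp), List.filter_append,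
          List.filter_eq_self.mpr (by intro x hx; simpa using hA2 x hx),
          List.filter_eq_nil_iff.mpr (by intro x hx; have := hA3 x hx; simp only [beq_iff_eq]; omega)]
        simp [keyed_map_snd]
      -- filter at a later key ignores the head and the first run
      have hfiltb : ∀ k ∈ PySem.List.dedup ((keyed (j + 1 + (splitRun1 p.1 rest).1.length)
            (splitRun1 p.1 rest).2).map Prod.fst),
          ((keyed j (p :: rest)).filter (fun x => x.1 == k)).map Prod.snd
            = ((keyed (j + 1 + (splitRun1 p.1 rest).1.length) (splitRun1 p.1 rest).2).filter
                (fun x => x.1 == k)).map Prod.snd := by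
        intro k hk
        rw [PySem.List.mem_dedup] at hk
        obtain ⟨x, hx, hxk⟩ := List.mem_map.mp hk
        have hkgt : p.1 - j < k := hxk ▸ hA3 x hx
        rw [hdec, List.filter_cons_of_neg (by simp; omega), List.filter_append,
          List.filter_eq_nil_iff.mpr (by
            intro y hy
            have := hA2 y hy
            simp only [beq_iff_eq, this]
            omega)]
        simp
      -- assemble and recurse on the remainder
      have hblen : (splitRun1 p.1 rest).2.length ≤ n := by
        have h1 : (p :: rest).length ≤ n + 1 := hlen
        have h2 := congrArg List.length hrest
        simp only [List.length_append] at h2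
        simp only [List.length_cons] at h1
        omega
      have hpwb : (splitRun1 p.1 rest).2.Pairwise (fun x y : Int × Int => x.1 < y.1) := by
        have hsub : (splitRun1 p.1 rest).2.Sublist rest := by
          conv_rhs => rw [hrest]
          exact List.sublist_append_right _ _
        exact List.Pairwise.sublist hsub hpwt
      rw [hded, List.map_cons, hfilt0, List.map_congr_left hfiltb,
        ih (splitRun1 p.1 rest).2 hblen (j + 1 + (splitRun1 p.1 rest).1.length) hpwb,
        show runsOf (p :: rest) = runsFrom [p] rest from rfl,
        runsFrom_splitRun1 rest [p] p rfl]
      simp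

-- the collected pairs have strictly increasing row indices
theorem pairs_pairwise (list_ : List String) :
    ((PySem.List.enumerate list_).foldl pairStep []).Pairwise
      (fun x y : Int × Int => x.1 < y.1) := by
  rw [pairFold]
  simp only [List.nil_append]
  rw [List.pairwise_filterMap]
  apply List.Pairwise.imp ?_ (PySem.List.pairwise_lt_enumerate list_ 0)
  intro a a' h b hb b' hb'
  obtain ⟨v, hv, rfl⟩ := Option.map_eq_some_iff.mp hb
  obtain ⟨v', hv', rfl⟩ := Option.map_eq_some_iff.mp hb'
  exact h

-- outside D_, no consecutive extension carries the value 999999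
theorem chainRG_of_notD (list_ : List String) (hD : ¬ D_get_consecutive_int_rows list_) :
    List.IsChain RG ((PySem.List.enumerate list_).foldl pairStep []) := by
  rw [List.isChain_iff_getElem]
  intro i hi
  intro heq hv
  apply hD
  set l := (PySem.List.enumerate list_).foldl pairStep [] with hl
  obtain ⟨k, hk, hxk, hx2⟩ := mem_pairs list_ (l[i]'(by omega)) (List.getElem_mem (by omega))
  obtain ⟨k', hk', hyk, hy2⟩ := mem_pairs list_ (l[i + 1]'hi) (List.getElem_mem hi)
  have hkk : k' = k + 1 := by
    rw [hyk, hxk] at heq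
    omega
  unfold D_get_consecutive_int_rows
  rw [List.any_eq_true]
  refine ⟨(list_[k], list_[k + 1]'(by omega)), ?_, ?_⟩
  · rw [List.mem_iff_getElem]
    refine ⟨k, by simp [List.length_zip, List.length_tail]; omega, ?_⟩
    rw [List.getElem_zip, List.getElem_tail]
  · subst hkk
    rw [hx2]
    have hv' : l[i + 1].2 = 999999 := hv
    simp [hy2, hv']

theorem A_eqF (list_ : List String) :
    get_consecutive_int_rows list_
      = (commit PySem.Dict.empty 1
          (runsOfF ((PySem.List.enumerate list_).foldl pairStep []))).items := by
  unfold get_consecutive_int_rows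
  simp only [pairs_decomp list_]
  cases hp : (PySem.List.enumerate list_).foldl pairStep [] with
  | nil =>
    simp [stepA, commit, runsOfF, PySem.List.enumerate]
  | cons p rest =>
    rw [List.cons_append, List.foldl_cons]
    have h1 : stepA (PySem.Dict.empty, 1, [], [], none) p
        = (PySem.Dict.empty, 1, [p.1], [p.2], some p.1) := by
      simp [stepA]
    rw [h1]
    have := loopA rest (list_.length : Int) PySem.Dict.empty 1 [p] p rfl
    simpa using this

theorem A_eq (list_ : List String) (hD : ¬ D_get_consecutive_int_rows list_) :
    get_consecutive_int_rows list_
      = (commit PySem.Dict.empty 1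
          (runsOf ((PySem.List.enumerate list_).foldl pairStep []))).items := by
  rw [A_eqF list_]
  have hch := chainRG_of_notD list_ hD
  cases hp : (PySem.List.enumerate list_).foldl pairStep [] with
  | nil => rfl
  | cons p rest =>
    rw [hp] at hch
    rw [show runsOfF (p :: rest) = runsFromF [p] rest from rfl,
      show runsOf (p :: rest) = runsFrom [p] rest from rfl,
      runsFromF_eq_runsFrom rest [p] p rfl (by simpa using hch)]

theorem B_eq (list_ : List String) :
    get_consecutive_int_rows_alt list_
      = (commit PySem.Dict.empty 1
          (runsOf ((PySem.List.enumerate list_).foldl pairStep []))).items := by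
  simp only [get_consecutive_int_rows_alt]
  set ps := (PySem.List.enumerate list_).foldl pairStep [] with hps
  have hpw := pairs_pairwise list_
  rw [← hps] at hpw
  have hfold : (PySem.List.enumerate ps).foldl
      (fun d kp => d.modify (kp.2.1 - kp.1) [] (fun l => l ++ [kp.2])) PySem.Dict.empty
      = (keyed 0 ps).foldl (fun d p => d.modify p.1 [] (fun l => l ++ [p.2]))
          PySem.Dict.empty := by
    rw [keyed, List.foldl_map]
  have hnd : ((keyed 0 ps).foldl (fun d p => d.modify p.1 [] (fun l => l ++ [p.2]))
      PySem.Dict.empty).keys.Nodup := by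
    exact PySem.Dict.nodup_keys_foldl_modify_key (keyed 0 ps) Prod.fst []
      (fun _ p => fun l => l ++ [p.2]) PySem.Dict.empty (by simp)
  have hupd : ∀ lk : List Int, PySem.Set.update ([] : PySem.Set Int) lk = PySem.List.dedup lk := by
    intro lk
    rw [PySem.List.dedup_eq_ofList, PySem.Set.ofList_eq_foldl]
    rfl
  have hvals : ((keyed 0 ps).foldl (fun d p => d.modify p.1 [] (fun l => l ++ [p.2]))
      PySem.Dict.empty).values = runsOf ps := by
    rw [PySem.Dict.values_eq_map_keys _ hnd []]
    rw [PySem.Dict.keys_foldl_modify_key (keyed 0 ps) Prod.fst []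
      (fun _ p => fun l => l ++ [p.2]) PySem.Dict.empty]
    have hgetD : ∀ k : Int, ((keyed 0 ps).foldl
        (fun d p => d.modify p.1 [] (fun l => l ++ [p.2])) PySem.Dict.empty).getD k []
        = ((keyed 0 ps).filter (fun x => x.1 == k)).map (fun x => x.2) := by
      intro k
      rw [PySem.Dict.getD_foldl_modify_append]
      simp
    simp only [hgetD]
    rw [show PySem.Dict.empty.keys = ([] : List Int) from rfl, hupd]
    exact groupByKey_eq_runs ps.length ps le_rfl 0 hpw
  rw [hfold, hvals]
  rfl

-- break predicates on an adjacent pair (previous, next) of the pair stream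
def breakB (pq : (Int × Int) × (Int × Int)) : Bool := !(pq.2.1 - pq.1.1 == 1)
def breakF (pq : (Int × Int) × (Int × Int)) : Bool :=
  !((pq.2.1 - pq.1.1 == 1) && !(pq.2.2 == 999999))

theorem runsFrom_length (ps : List (Int × Int)) (cur : List (Int × Int)) (q : Int × Int)
    (hlast : cur.getLast? = some q) :
    (runsFrom cur ps).length = 1 + List.countP breakB ((q :: ps).zip ps) := by
  induction ps generalizing cur q with
  | nil => simp [runsFrom]
  | cons p ps ih =>
    rw [List.zip_cons_cons, List.countP_cons]
    by_cases hc : p.1 - q.1 = 1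
    · have h2 : runsFrom cur (p :: ps) = runsFrom (cur ++ [p]) ps := by
        simp [runsFrom, splitStep, hlast, hc]
      have hb : breakB (q, p) = false := by simp [breakB, hc]
      rw [h2, ih (cur ++ [p]) p (by simp), hb]
      simp
    · have hb : breakB (q, p) = true := by simp [breakB]; omega
      rw [runsFrom_break cur q p ps hlast hc, List.length_cons,
        ih [p] p rfl, hb]
      simp
      omega

theorem runsFromF_length (ps : List (Int × Int)) (cur : List (Int × Int)) (q : Int × Int)
    (hlast : cur.getLast? = some q) :
    (runsFromF cur ps).length = 1 + List.countP breakF ((q :: ps).zip ps) := by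
  induction ps generalizing cur q with
  | nil => simp [runsFromF]
  | cons p ps ih =>
    rw [List.zip_cons_cons, List.countP_cons]
    by_cases hc : p.1 - q.1 = 1 ∧ p.2 ≠ 999999
    · have h2 : runsFromF cur (p :: ps) = runsFromF (cur ++ [p]) ps := by
        simp [runsFromF, splitStepF, hlast, hc]
      have hb : breakF (q, p) = false := by simp [breakF]; omega
      rw [h2, ih (cur ++ [p]) p (by simp), hb]
      simp
    · have hb : breakF (q, p) = true := by
        simp [breakF]
        rcases Decidable.not_and_iff_not_or_not.mp hc with h' | h'
        · exact Or.inl h'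
        · exact Or.inr (not_not.mp h')
      rw [runsFromF_break cur q p ps hlast hc, List.length_cons,
        ih [p] p rfl, hb]
      simp
      omega

-- a strictly finer break predicate yields strictly more groups
theorem countP_lt_of_witness {α : Type} (l : List α) (p q : α → Bool)
    (himp : ∀ x ∈ l, q x = true → p x = true) (x : α) (hx : x ∈ l)
    (hpx : p x = true) (hqx : q x = false) : l.countP q < l.countP p := by
  induction l with
  | nil => simp at hx
  | cons y l ih =>
    rw [List.countP_cons, List.countP_cons]
    have hmono : l.countP q ≤ l.countP p :=
      List.countP_mono_left (fun z hz => himp z (List.mem_cons_of_mem _ hz))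
    rcases List.mem_cons.mp hx with rfl | hx'
    · rw [hpx, hqx]
      simp
      omega
    · have := ih (fun z hz h => himp z (List.mem_cons_of_mem _ hz) h) hx'
      by_cases hqy : q y = true
      · rw [hqy, himp y List.mem_cons_self hqy]; omega
      · rw [Bool.not_eq_true] at hqy
        rw [hqy]
        by_cases hpy : p y = true <;> simp [hpy] <;> omega

-- two pairs with consecutive rows are adjacent in the strictly increasing pair stream
theorem adj_of_mem (ps : List (Int × Int))
    (hpw : ps.Pairwise (fun a b => a.1 < b.1)) (x y : Int × Int)
    (hx : x ∈ ps) (hy : y ∈ ps) (hxy : y.1 = x.1 + 1) : (x, y) ∈ ps.zip ps.tail := by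
  obtain ⟨i, hi, rfl⟩ := List.mem_iff_getElem.mp hx
  obtain ⟨j, hj, rfl⟩ := List.mem_iff_getElem.mp hy
  have hg := List.pairwise_iff_getElem.mp hpw
  have hij : i < j := by
    rcases lt_trichotomy i j with h | h | h
    · exact h
    · subst h; omega
    · have := hg j i hj hi h; omega
  have hji : j = i + 1 := by
    by_contra h
    have h1 := hg i (i + 1) hi (by omega) (by omega)
    have h2 := hg (i + 1) j (by omega) hj (by omega)
    omega
  subst hji
  rw [List.mem_iff_getElem]
  refine ⟨i, by simp [List.length_zip, List.length_tail]; omega, ?_⟩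
  rw [List.getElem_zip, List.getElem_tail]

-- a row whose item parses contributes its pair to the stream
theorem pair_mem_pairs (list_ : List String) (k : Nat) (hk : k < list_.length) (v : Int)
    (hv : PySem.Int.ofStr? list_[k] = some v) :
    ((k : Int), v) ∈ (PySem.List.enumerate list_).foldl pairStep [] := by
  rw [pairFold]
  simp only [List.nil_append, List.mem_filterMap]
  refine ⟨((k : Int), list_[k]), ?_, by simp [hv]⟩
  rw [PySem.List.mem_enumerate_iff]
  exact ⟨k, hk, by simp⟩

theorem commit_items_length (rs : List (List (Int × Int))) :
    (commit PySem.Dict.empty 1 rs).items.length = rs.length := by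
  unfold commit
  rw [PySem.Dict.items_foldl_insert_fresh (PySem.List.enumerate rs 1) Prod.fst
    (fun gr => runEntry gr.2) PySem.Dict.empty
    (by intro a _; simp)
    (by
      have : (PySem.List.enumerate rs 1).map Prod.fst
          = PySem.List.pyRange 1 (1 + rs.length) 1 := PySem.List.map_fst_enumerate rs 1
      rw [this]
      exact PySem.List.nodup_pyRange_one 1 (1 + rs.length))]
  simp [PySem.List.length_enumerate,
    show (PySem.Dict.empty : PySem.Dict Int (List (String × List Int))).items = [] from rfl]

-- ===== VERDICT (by name: the statement is the Claim_ definition above) =====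
theorem get_consecutive_int_rows_spec : Claim_unchanged_get_consecutive_int_rows := by
  intro list_ _ hD
  exact (A_eq list_ hD).trans (B_eq list_).symm

theorem get_consecutive_int_rows_changed : Claim_changed_get_consecutive_int_rows := by
  unfold Claim_changed_get_consecutive_int_rows; decide

theorem get_consecutive_int_rows_tight : Claim_exact_get_consecutive_int_rows := by
  intro list_ _ hD hEq
  unfold D_get_consecutive_int_rows at hD
  rw [List.any_eq_true] at hD
  obtain ⟨pr, hmem, hcond⟩ := hD
  rw [List.mem_iff_getElem] at hmem
  obtain ⟨k, hk, hpr⟩ := hmem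
  have hklen : k + 1 < list_.length := by
    simp [List.length_zip, List.length_tail] at hk
    omega
  have hpr1 : pr.1 = list_[k]'(by omega) := by rw [← hpr, List.getElem_zip]
  have hpr2 : pr.2 = list_[k + 1] := by
    rw [← hpr, List.getElem_zip]
    simp [List.getElem_tail]
  rw [hpr1, hpr2] at hcond
  simp only [Bool.and_eq_true, beq_iff_eq, Option.isSome_iff_exists] at hcond
  obtain ⟨⟨v, hv⟩, h999⟩ := hcond
  set ps := (PySem.List.enumerate list_).foldl pairStep [] with hps
  have hx : ((k : Int), v) ∈ ps := pair_mem_pairs list_ k (by omega) v hv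
  have hy : (((k + 1 : Nat) : Int), 999999) ∈ ps := pair_mem_pairs list_ (k + 1) hklen _ h999
  have hpw : ps.Pairwise (fun a b : Int × Int => a.1 < b.1) := pairs_pairwise list_
  have hadj : (((k : Int), v), (((k + 1 : Nat) : Int), 999999)) ∈ ps.zip ps.tail :=
    adj_of_mem ps hpw _ _ hx hy (by push_cast; ring)
  have hlenEq : (runsOfF ps).length = (runsOf ps).length := by
    have h1 := congrArg List.length hEq
    rw [A_eqF list_, B_eq list_, commit_items_length, commit_items_length] at h1
    exact h1
  cases hpp : ps with
  | nil => rw [hpp] at hx; simp at hx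
  | cons p rest =>
    have hAlen : (runsOfF ps).length = 1 + List.countP breakF ((p :: rest).zip rest) := by
      rw [hpp]; exact runsFromF_length rest [p] p rfl
    have hBlen : (runsOf ps).length = 1 + List.countP breakB ((p :: rest).zip rest) := by
      rw [hpp]; exact runsFrom_length rest [p] p rfl
    have hzip : ps.zip ps.tail = (p :: rest).zip rest := by rw [hpp]; rfl
    have hlt : List.countP breakB ((p :: rest).zip rest)
        < List.countP breakF ((p :: rest).zip rest) := by
      apply countP_lt_of_witness _ breakF breakB ?_ (((k : Int), v), (((k + 1 : Nat) : Int), 999999))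
        (by rw [← hzip]; exact hadj) ?_ ?_
      · intro pq _ hq
        by_cases hc : (pq.2.1 - pq.1.1 == 1) = true
        · simp [breakB, hc] at hq
        · simp only [Bool.not_eq_true] at hc
          simp [breakF, hc]
      · simp [breakF]
      · simp [breakB]
    rw [hpp] at hlenEq
    rw [hpp] at hAlen hBlen
    omega
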